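-- pv_equiv track=rewrite | github.com/oke-aditya/dsa | Two_Pointer/zero_sum_triplet.py | findTripletsBrute
-- ===== SOURCE A (Python) =====
-- from typing import List
--
-- def findTripletsBrute(arr: List[int], n: int) -> bool:
--     found = False
--     for i in range(n-2):
--         for j in range(i+1, n-1):
--             for k in range(j+1, n):
--
--                 if(arr[i] + arr[j] + arr[k] == n):
--                     found = True
--                     return found
--
--     return found
-- ===== SOURCE B (Python) =====
-- def _two_sum(xs, target):
--     seen = set()
--     for y in xs:
--         if target - y in seen:
--             return True
--         seen.add(y)
--     return False
--
--
-- def findTripletsBrute(arr, n):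
--     if n < 3:
--         return False
--     rest = arr[:n]
--     while len(rest) >= 3:
--         x = rest[0]
--         rest = rest[1:]
--         if _two_sum(rest, n - x):
--             return True
--     return False
-- ===== Notes on version B (the rewrite author's own statement) =====
-- stated objective: faster
-- what changed: Replaces A's triple nested index loop by a single pass that pops each head element and runs a hash-set two-sum scan over the remaining prefix for the remainder n - head.
-- outside the precondition, e.g. on findTripletsBrute([1, 1, 3], 5): A returns True, B returns True; on findTripletsBrute([1, 2, 4], 5): A raises IndexError, B returns False
import Mathlib
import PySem

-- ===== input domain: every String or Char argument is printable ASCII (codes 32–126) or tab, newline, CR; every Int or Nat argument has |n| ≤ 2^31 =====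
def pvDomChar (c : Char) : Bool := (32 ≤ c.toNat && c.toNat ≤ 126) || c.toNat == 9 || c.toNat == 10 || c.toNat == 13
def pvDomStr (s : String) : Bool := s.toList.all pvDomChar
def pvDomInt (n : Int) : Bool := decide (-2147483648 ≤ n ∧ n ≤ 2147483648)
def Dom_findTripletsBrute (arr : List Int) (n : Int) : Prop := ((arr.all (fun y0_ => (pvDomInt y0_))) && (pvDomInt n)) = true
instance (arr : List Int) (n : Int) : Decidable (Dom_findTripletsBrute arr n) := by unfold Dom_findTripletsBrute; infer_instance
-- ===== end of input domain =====

-- B replaces A's O(n^3) triple loop by a per-head hash-set two-sum pass (O(n^2)); return values proved equal on Pre_.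

-- ===== PORT A =====
-- triple nested loop with early return; arr[i] is in range on every input Pre_ admits
def findTripletsBrute (arr : List Int) (n : Int) : Bool :=
  (PySem.List.pyRange 0 (n-2) 1).any fun i =>
    (PySem.List.pyRange (i+1) (n-1) 1).any fun j =>
      (PySem.List.pyRange (j+1) n 1).any fun k =>
        PySem.List.pyGetD arr i 0 + PySem.List.pyGetD arr j 0 + PySem.List.pyGetD arr k 0 == n

-- ===== PORT B =====
-- _two_sum: one pass with a growing 'seen' set
def twoSumGo (target : Int) : List Int → PySem.Set Int → Bool
  | [], _ => false
  | y :: ys, seen =>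
      if PySem.Set.contains seen (target - y) then true
      else twoSumGo target ys (PySem.Set.add seen y)

-- the while loop: pop the head, two-sum the rest
def altGo (n : Int) : List Int → Bool
  | [] => false
  | x :: ys =>
      if ys.length < 2 then false
      else twoSumGo (n - x) ys PySem.Set.empty || altGo n ys

def findTripletsBrute_alt (arr : List Int) (n : Int) : Bool :=
  if n < 3 then false
  else altGo n (PySem.List.slice arr none (some n))

-- ===== PRECONDITION & SPEC =====
-- Pre_ excludes inputs with 3 ≤ n and n > len(arr): there A raises IndexError on every input except
-- the accidental ones where a triplet among (arr[0], arr[1], arr[k]) is found before the first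
-- out-of-range access (then A returns True, as does B).
def Pre_findTripletsBrute (arr : List Int) (n : Int) : Prop := n < 3 ∨ n ≤ (arr.length : Int)
instance (arr : List Int) (n : Int) : Decidable (Pre_findTripletsBrute arr n) := by unfold Pre_findTripletsBrute; infer_instance
def pvWitness_findTripletsBrute : List Int × Int := ([1, 1, 2, 5], 4)

def Spec_findTripletsBrute (arr : List Int) (n : Int) (out : Bool) : Prop := out = findTripletsBrute_alt arr n
instance (arr : List Int) (n : Int) (out : Bool) : Decidable (Spec_findTripletsBrute arr n out) := by unfold Spec_findTripletsBrute; infer_instance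

-- ===== CLAIM (what is proved, stated in full; the proofs are below) =====
def Claim_equal_findTripletsBrute : Prop := ∀ (arr : List Int) (n : Int), Dom_findTripletsBrute arr n → Pre_findTripletsBrute arr n → Spec_findTripletsBrute arr n (findTripletsBrute arr n)

-- ===== LEMMAS AND PROOFS =====

-- loop-free counterpart of the two-sum scan: some ordered pair of ys sums to t
def pairAnyB (t : Int) : List Int → Bool
  | [] => false
  | y :: ys => (ys.any fun z => y + z == t) || pairAnyB t ys

-- loop-free counterpart of altGo: some ordered triple of a sums to n
def tripAnyB (n : Int) : List Int → Bool
  | [] => false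
  | x :: ys => pairAnyB (n - x) ys || tripAnyB n ys

theorem twoSumGo_eq (t : Int) (ys : List Int) (seen : PySem.Set Int) :
    twoSumGo t ys seen = ((ys.any fun z => PySem.Set.contains seen (t - z)) || pairAnyB t ys) := by
  induction ys generalizing seen with
  | nil => simp [twoSumGo, pairAnyB]
  | cons y ys ih =>
      simp only [twoSumGo, List.any_cons, pairAnyB]
      by_cases h : PySem.Set.contains seen (t - y) = true
      · rw [PySem.Set.contains_iff] at h
        simp [h]
      · have h' : t - y ∉ seen := fun hm => h ((PySem.Set.contains_iff seen (t - y)).mpr hm)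
        rw [if_neg h, ih, Bool.eq_iff_iff]
        simp only [Bool.or_eq_true, List.any_eq_true, PySem.Set.contains_iff,
          PySem.Set.mem_add, beq_iff_eq]
        constructor
        · rintro (⟨z, hz, hm | he⟩ | hp)
          · exact Or.inl (Or.inr ⟨z, hz, hm⟩)
          · exact Or.inr (Or.inl ⟨z, hz, by omega⟩)
          · exact Or.inr (Or.inr hp)
        · rintro ((hm | ⟨z, hz, hm⟩) | (⟨z, hz, he⟩ | hp))
          · exact absurd hm h'
          · exact Or.inl ⟨z, hz, Or.inl hm⟩
          · exact Or.inl ⟨z, hz, Or.inr (by omega)⟩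
          · exact Or.inr hp

theorem altGo_eq (n : Int) (a : List Int) : altGo n a = tripAnyB n a := by
  induction a with
  | nil => rfl
  | cons x ys ih =>
      simp only [altGo, tripAnyB, ← ih]
      by_cases h : ys.length < 2
      · rw [if_pos h]
        match ys, h with
        | [], _ => simp [pairAnyB, altGo]
        | [z], _ => simp [pairAnyB, altGo]
      · rw [if_neg h, twoSumGo_eq]
        have hz : (ys.any fun z => PySem.Set.contains PySem.Set.empty ((n - x) - z)) = false := by
          simp [List.any_eq_false, PySem.Set.contains, PySem.Set.empty]
        rw [hz, Bool.false_or]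

theorem pairAnyB_iff (t : Int) (ys : List Int) :
    pairAnyB t ys = true ↔ ∃ p q : Nat, p < q ∧ q < ys.length ∧ ys.getD p 0 + ys.getD q 0 = t := by
  induction ys with
  | nil => simp [pairAnyB]
  | cons y ys ih =>
      simp only [pairAnyB, Bool.or_eq_true, ih, List.any_eq_true, beq_iff_eq]
      constructor
      · rintro (⟨z, hz, hzt⟩ | ⟨p, q, hpq, hq, hsum⟩)
        · rcases List.mem_iff_getElem.mp hz with ⟨q, hq, rfl⟩
          refine ⟨0, q + 1, by omega, by simp; omega, ?_⟩
          simpa [List.getD_eq_getElem?_getD, List.getElem?_eq_getElem, hq] using hzt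
        · exact ⟨p + 1, q + 1, by omega, by simp; omega, by simpa using hsum⟩
      · rintro ⟨p, q, hpq, hq, hsum⟩
        simp only [List.length_cons] at hq
        match p, q, hpq with
        | 0, q + 1, _ =>
            left
            have hq' : q < ys.length := by omega
            refine ⟨ys[q], List.getElem_mem hq', ?_⟩
            simpa [List.getD_eq_getElem?_getD, List.getElem?_eq_getElem, hq'] using hsum
        | p + 1, q + 1, _ =>
            right
            exact ⟨p, q, by omega, by omega, by simpa using hsum⟩

theorem tripAnyB_iff (n : Int) (a : List Int) :
    tripAnyB n a = true ↔
      ∃ i j k : Nat, i < j ∧ j < k ∧ k < a.length ∧ a.getD i 0 + a.getD j 0 + a.getD k 0 = n := by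
  induction a with
  | nil => simp [tripAnyB]
  | cons x ys ih =>
      simp only [tripAnyB, Bool.or_eq_true, ih, pairAnyB_iff]
      constructor
      · rintro (⟨p, q, hpq, hq, hsum⟩ | ⟨i, j, k, hij, hjk, hk, hsum⟩)
        · refine ⟨0, p + 1, q + 1, by omega, by omega, by simp; omega, ?_⟩
          simp only [List.getD_cons_zero, List.getD_cons_succ]
          omega
        · exact ⟨i + 1, j + 1, k + 1, by omega, by omega, by simp; omega, by simpa using hsum⟩
      · rintro ⟨i, j, k, hij, hjk, hk, hsum⟩
        simp only [List.length_cons] at hk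
        match i, j, k, hij, hjk with
        | 0, j + 1, k + 1, _, _ =>
            left
            refine ⟨j, k, by omega, by omega, ?_⟩
            simp only [List.getD_cons_zero, List.getD_cons_succ] at hsum
            omega
        | i + 1, j + 1, k + 1, _, _ =>
            right
            exact ⟨i, j, k, by omega, by omega, by omega, by simpa using hsum⟩

theorem findTripletsBrute_iff (arr : List Int) (n : Int) :
    findTripletsBrute arr n = true ↔
      ∃ i j k : Nat, i < j ∧ j < k ∧ (k : Int) < n ∧ arr.getD i 0 + arr.getD j 0 + arr.getD k 0 = n := by
  simp only [findTripletsBrute, List.any_eq_true, PySem.List.mem_pyRange_one, beq_iff_eq]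
  constructor
  · rintro ⟨i, ⟨hi0, hi⟩, j, ⟨hj0, hj⟩, k, ⟨hk0, hk⟩, hsum⟩
    rw [PySem.List.pyGetD_of_nonneg arr 0 hi0, PySem.List.pyGetD_of_nonneg arr 0 (by omega : (0:Int) ≤ j),
      PySem.List.pyGetD_of_nonneg arr 0 (by omega : (0:Int) ≤ k)] at hsum
    exact ⟨i.toNat, j.toNat, k.toNat, by omega, by omega, by omega, hsum⟩
  · rintro ⟨i, j, k, hij, hjk, hk, hsum⟩
    refine ⟨(i : Int), ⟨by omega, by omega⟩, (j : Int), ⟨by omega, by omega⟩,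
      (k : Int), ⟨by omega, by omega⟩, ?_⟩
    rw [PySem.List.pyGetD_of_nonneg arr 0 (by omega : (0:Int) ≤ (i:Int)),
      PySem.List.pyGetD_of_nonneg arr 0 (by omega : (0:Int) ≤ (j:Int)),
      PySem.List.pyGetD_of_nonneg arr 0 (by omega : (0:Int) ≤ (k:Int))]
    simpa using hsum

-- ===== VERDICT (by name: the statement is the Claim_ definition above) =====
theorem findTripletsBrute_spec : Claim_equal_findTripletsBrute := by
  intro arr n _ hpre
  unfold Spec_findTripletsBrute findTripletsBrute_alt
  by_cases h3 : n < 3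
  · rw [if_pos h3]
    unfold findTripletsBrute
    rw [PySem.List.pyRange_one_eq_nil (by omega)]
    rfl
  · rw [if_neg h3]
    have hn : n ≤ (arr.length : Int) := by
      rcases hpre with h | h
      · omega
      · exact h
    have h0 : (0:Int) ≤ n := by omega
    rw [PySem.List.slice_to arr h0, altGo_eq]
    rw [Bool.eq_iff_iff, findTripletsBrute_iff arr n, tripAnyB_iff]
    have hlen : (List.take n.toNat arr).length = n.toNat := by
      simp; omega
    have hgd : ∀ m : Nat, (m : Int) < n → (List.take n.toNat arr).getD m 0 = arr.getD m 0 := by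
      intro m hm
      rw [List.getD_eq_getElem?_getD, List.getD_eq_getElem?_getD,
        List.getElem?_take_of_lt (by omega)]
    constructor
    · rintro ⟨i, j, k, hij, hjk, hk, hsum⟩
      refine ⟨i, j, k, hij, hjk, by omega, ?_⟩
      rw [hgd i (by omega), hgd j (by omega), hgd k hk]
      exact hsum
    · rintro ⟨i, j, k, hij, hjk, hk, hsum⟩
      rw [hlen] at hk
      refine ⟨i, j, k, hij, hjk, by omega, ?_⟩
      rwa [hgd i (by omega), hgd j (by omega), hgd k (by omega)] at hsum
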